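-- pv_equiv track=rewrite | github.com/koimabrian/fx_trading_bot_modified | src/backtesting/trade_extractor.py | _calculate_streaks
-- ===== SOURCE A (Python) =====
-- from typing import Any, Dict, List, Optional
--
-- def _calculate_streaks(is_win_list: List[bool]) -> List[int]:
--     """Calculate consecutive win/loss streaks.
--
--     Args:
--         is_win_list: List of boolean values (True for win, False for loss).
--
--     Returns:
--         List of streak lengths. Each element represents a consecutive
--         run of the same boolean value.
--     """
--     if not is_win_list:
--         return []
--
--     streaks = []
--     current_streak = 1
--
--     for i in range(1, len(is_win_list)):
--         # Ensure boolean comparison by converting to Python bool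
--         current = bool(is_win_list[i])
--         previous = bool(is_win_list[i - 1])
--         if current == previous:
--             current_streak += 1
--         else:
--             streaks.append(current_streak)
--             current_streak = 1
--
--     streaks.append(current_streak)
--     return streaks
-- ===== SOURCE B (Python) =====
-- from typing import List
--
--
-- def _calculate_streaks(is_win_list: List[bool]) -> List[int]:
--     """Two staged passes: first collect the indices where the value changes,
--     then take pairwise differences of the boundary positions [0, changes..., n]."""
--     n = len(is_win_list)
--     if n == 0:
--         return []
--     change_points = [i for i in range(1, n)
--                      if bool(is_win_list[i]) != bool(is_win_list[i - 1])]
--     edges = [0] + change_points + [n]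
--     return [edges[k + 1] - edges[k] for k in range(len(edges) - 1)]
-- ===== Notes on version B (the rewrite author's own statement) =====
-- stated objective: alternative
-- what changed: Instead of a single pass with a running counter reset on change, B first collects the boundary indices where the boolean value changes, builds the edge list [0, changes..., n], and returns the pairwise differences of consecutive edges.
import Mathlib
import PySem

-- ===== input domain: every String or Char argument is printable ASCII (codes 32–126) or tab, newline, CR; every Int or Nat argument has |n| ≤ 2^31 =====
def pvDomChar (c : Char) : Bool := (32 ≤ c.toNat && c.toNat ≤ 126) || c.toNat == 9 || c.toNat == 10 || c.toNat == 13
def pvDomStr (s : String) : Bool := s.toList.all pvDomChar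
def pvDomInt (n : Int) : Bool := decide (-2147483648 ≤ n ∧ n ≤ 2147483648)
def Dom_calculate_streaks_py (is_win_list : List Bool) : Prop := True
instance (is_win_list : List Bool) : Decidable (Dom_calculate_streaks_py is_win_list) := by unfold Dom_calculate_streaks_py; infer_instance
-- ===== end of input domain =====

-- B replaces A's running-counter loop by two staged passes: collect the change indices, then diff consecutive boundary positions; alternative, same cost.

-- ===== PORT A =====
-- Literal transliteration of A: guard the empty list, then fold the loop body over
-- range(1, len(is_win_list)) with state (streaks, current_streak); indices i and i-1 are
-- always in range, so pyGetD with default false is exact here.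
def calculate_streaks_py (is_win_list : List Bool) : List Int :=
  if is_win_list = [] then []
  else
    let r := (PySem.List.pyRange 1 (is_win_list.length : Int) 1).foldl
      (fun (st : List Int × Int) i =>
        let current := PySem.List.pyGetD is_win_list i false
        let previous := PySem.List.pyGetD is_win_list (i - 1) false
        if current == previous then (st.1, st.2 + 1) else (st.1 ++ [st.2], 1))
      ([], 1)
    r.1 ++ [r.2]

-- ===== PORT B =====
-- Transliteration of Source B: collect the change indices over range(1, n) (indices are
-- always in range, so pyGetD with default false is exact), build edges = [0]+changes+[n],
-- then map k ↦ edges[k+1] - edges[k] over range(len(edges)-1).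
def calculate_streaks_py_alt (is_win_list : List Bool) : List Int :=
  if is_win_list.length = 0 then []
  else
    let change_points := (PySem.List.pyRange 1 (is_win_list.length : Int) 1).filter
      (fun i => PySem.List.pyGetD is_win_list i false != PySem.List.pyGetD is_win_list (i - 1) false)
    let edges := (0 : Int) :: (change_points ++ [(is_win_list.length : Int)])
    (List.range (edges.length - 1)).map (fun k => edges.getD (k + 1) 0 - edges.getD k 0)

-- ===== PRECONDITION & SPEC =====
def Spec_calculate_streaks_py (is_win_list : List Bool) (out : List Int) : Prop := out = calculate_streaks_py_alt is_win_list
instance (is_win_list : List Bool) (out : List Int) : Decidable (Spec_calculate_streaks_py is_win_list out) := by unfold Spec_calculate_streaks_py; infer_instance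

-- ===== CLAIM (what is proved, stated in full; the proofs are below) =====
def Claim_equal_calculate_streaks_py : Prop := ∀ (is_win_list : List Bool), Dom_calculate_streaks_py is_win_list → Spec_calculate_streaks_py is_win_list (calculate_streaks_py is_win_list)

-- ===== LEMMAS AND PROOFS =====

-- Common reference value: the run-length decomposition, structurally.
def pvRuns (l : List Bool) : List Int :=
  match l with
  | [] => []
  | x :: xs =>
      (1 + ((xs.takeWhile (· == x)).length : Int)) :: pvRuns (xs.dropWhile (· == x))
termination_by l.length
decreasing_by
  simp only [List.length_cons]
  exact Nat.lt_succ_of_le (List.length_dropWhile_le _ _)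

-- A's loop, re-expressed structurally: process the remaining elements, carrying the
-- previous element and the (streaks, current_streak) state.
def pvStep : List Bool → Bool → (List Int × Int) → (List Int × Int)
  | [], _, st => st
  | x :: xs, prev, st =>
      pvStep xs x (if x == prev then (st.1, st.2 + 1) else (st.1 ++ [st.2], 1))

-- B's change-point pass, re-expressed structurally: j is the index of the current element.
def pvBounds : List Bool → Bool → Int → List Int
  | [], _, _ => []
  | x :: xs, prev, j =>
      if x == prev then pvBounds xs x (j + 1) else j :: pvBounds xs x (j + 1)

-- Pairwise differences of consecutive entries.
def pvDiffs : List Int → List Int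
  | a :: b :: t => (b - a) :: pvDiffs (b :: t)
  | _ => []

-- The index fold of port A equals pvStep, starting anywhere in the list.
lemma pvStep_bridge (l : List Bool) :
    ∀ (n j : Nat) (st : List Int × Int), 1 ≤ j → l.length = j + n →
    (PySem.List.pyRange (j : Int) (l.length : Int) 1).foldl
      (fun (st : List Int × Int) i =>
        let current := PySem.List.pyGetD l i false
        let previous := PySem.List.pyGetD l (i - 1) false
        if current == previous then (st.1, st.2 + 1) else (st.1 ++ [st.2], 1))
      st
    = pvStep (l.drop j) (PySem.List.pyGetD l ((j : Int) - 1) false) st := by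
  intro n
  induction n with
  | zero =>
      intro j st _ hlen
      rw [PySem.List.pyRange_one_eq_nil (by omega : (l.length : Int) ≤ (j : Int))]
      have : l.drop j = [] := List.drop_eq_nil_of_le (by omega)
      simp [this, pvStep]
  | succ n ih =>
      intro j st hj hlen
      have hjl : (j : Int) < (l.length : Int) := by exact_mod_cast (by omega : j < l.length)
      rw [PySem.List.pyRange_one_cons hjl]
      have hdrop : l.drop j = l[j] :: l.drop (j + 1) := by
        rw [List.drop_eq_getElem_cons (by omega)]
      have hjn : j < l.length := by omega
      have hget : PySem.List.pyGetD l (j : Int) false = l[j] := by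
        rw [PySem.List.pyGetD_eq_getElem l false (by omega) (by exact_mod_cast hjn)]
        simp
      simp only [List.foldl_cons]
      have := ih (j + 1) (if l[j] == PySem.List.pyGetD l ((j:Int) - 1) false
          then (st.1, st.2 + 1) else (st.1 ++ [st.2], 1)) (by omega) (by omega)
      rw [show ((j : Int) + 1) = ((j + 1 : Nat) : Int) by push_cast; ring] at *
      rw [show ((j + 1 : Nat) : Int) - 1 = (j : Int) by push_cast; ring] at this
      rw [hget] at *
      rw [this, hdrop, pvStep, hget]

-- The index filter of port B equals pvBounds, starting anywhere in the list.
lemma pvBounds_bridge (l : List Bool) :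
    ∀ (n j : Nat), 1 ≤ j → l.length = j + n →
    (PySem.List.pyRange (j : Int) (l.length : Int) 1).filter
      (fun i => PySem.List.pyGetD l i false != PySem.List.pyGetD l (i - 1) false)
    = pvBounds (l.drop j) (PySem.List.pyGetD l ((j : Int) - 1) false) (j : Int) := by
  intro n
  induction n with
  | zero =>
      intro j _ hlen
      rw [PySem.List.pyRange_one_eq_nil (by omega : (l.length : Int) ≤ (j : Int))]
      have : l.drop j = [] := List.drop_eq_nil_of_le (by omega)
      simp [this, pvBounds]
  | succ n ih =>
      intro j hj hlen
      have hjl : (j : Int) < (l.length : Int) := by exact_mod_cast (by omega : j < l.length)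
      rw [PySem.List.pyRange_one_cons hjl]
      have hdrop : l.drop j = l[j] :: l.drop (j + 1) := by
        rw [List.drop_eq_getElem_cons (by omega)]
      have hjn : j < l.length := by omega
      have hget : PySem.List.pyGetD l (j : Int) false = l[j] := by
        rw [PySem.List.pyGetD_eq_getElem l false (by omega) (by exact_mod_cast hjn)]
        simp
      simp only [List.filter_cons]
      have := ih (j + 1) (by omega) (by omega)
      rw [show ((j : Int) + 1) = ((j + 1 : Nat) : Int) by push_cast; ring] at *
      rw [show ((j + 1 : Nat) : Int) - 1 = (j : Int) by push_cast; ring] at this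
      rw [hget] at *
      rw [this, hdrop, pvBounds, hget]
      by_cases h : l[j] = PySem.List.pyGetD l ((j : Int) - 1) false
      · simp [h]
      · simp [h]

-- Appending the final streak to pvStep's state yields the run decomposition.
lemma pvStep_spec :
    ∀ (rest : List Bool) (prev : Bool) (st : List Int) (cur : Int),
    (pvStep rest prev (st, cur)).1 ++ [(pvStep rest prev (st, cur)).2]
    = st ++ (cur + ((rest.takeWhile (· == prev)).length : Int)) ::
        pvRuns (rest.dropWhile (· == prev)) := by
  intro rest
  induction rest with
  | nil => intro prev st cur; simp [pvStep, pvRuns]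
  | cons x xs ih =>
      intro prev st cur
      by_cases h : x = prev
      · subst h
        simp only [pvStep, beq_self_eq_true, if_true]
        rw [ih]
        simp
        ring_nf
      · have hne : (x == prev) = false := by simp [h]
        simp only [pvStep, hne, Bool.false_eq_true, if_false]
        rw [ih x (st ++ [cur]) 1]
        conv_rhs => rw [pvRuns.eq_def]
        simp [hne]

-- Diffing the padded boundary list yields the run decomposition.
lemma pvDiffs_bounds :
    ∀ (rest : List Bool) (prev : Bool) (j base : Int),
    pvDiffs (base :: (pvBounds rest prev j ++ [j + (rest.length : Int)]))
    = (j - base + ((rest.takeWhile (· == prev)).length : Int)) ::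
        pvRuns (rest.dropWhile (· == prev)) := by
  intro rest
  induction rest with
  | nil => intro prev j base; simp [pvBounds, pvDiffs, pvRuns]
  | cons x xs ih =>
      intro prev j base
      by_cases h : x = prev
      · subst h
        simp only [pvBounds, beq_self_eq_true, if_true]
        rw [show j + ((x :: xs).length : Int) = (j + 1) + (xs.length : Int) by
          simp; ring]
        rw [ih x (j + 1) base]
        simp
        ring_nf
      · have hne : (x == prev) = false := by simp [h]
        simp only [pvBounds, hne, Bool.false_eq_true, if_false]
        rw [show j + ((x :: xs).length : Int) = (j + 1) + (xs.length : Int) by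
          simp; ring]
        simp only [List.cons_append, pvDiffs]
        rw [ih x (j + 1) j]
        conv_rhs => rw [pvRuns.eq_def]
        simp [hne]

-- The port's indexed map over edges is pvDiffs.
lemma map_getD_eq_pvDiffs :
    ∀ (es : List Int),
    (List.range (es.length - 1)).map (fun k => es.getD (k + 1) 0 - es.getD k 0)
    = pvDiffs es := by
  intro es
  match es with
  | [] => simp [pvDiffs]
  | [a] => simp [pvDiffs]
  | a :: b :: t =>
      have ih := map_getD_eq_pvDiffs (b :: t)
      rw [pvDiffs, show (a :: b :: t).length - 1 = t.length + 1 by simp,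
        List.range_succ_eq_map, List.map_cons, List.map_map]
      have hlen : (b :: t).length - 1 = t.length := by simp
      rw [hlen] at ih
      refine congrArg₂ List.cons (by simp) ?_
      rw [← ih]
      apply List.map_congr_left
      intro k _
      simp [List.getD]

-- A's port computes pvRuns.
lemma portA_eq_pvRuns (l : List Bool) : calculate_streaks_py l = pvRuns l := by
  unfold calculate_streaks_py
  match l with
  | [] => simp [pvRuns]
  | a :: xs =>
      rw [if_neg (List.cons_ne_nil a xs)]
      have hb := pvStep_bridge (a :: xs) xs.length 1 ([], 1) le_rfl (by simp [Nat.add_comm])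
      push_cast at hb
      rw [hb]
      have h0 : PySem.List.pyGetD (a :: xs) (0 : Int) false = a := by
        norm_num [PySem.List.pyGetD_eq_getElem]
      rw [h0]
      simp only [List.drop_one, List.tail_cons]
      show (pvStep xs a ([], 1)).1 ++ [(pvStep xs a ([], 1)).2] = _
      rw [pvStep_spec]
      conv_rhs => rw [pvRuns.eq_def]
      simp

-- B's port computes pvRuns.
lemma portB_eq_pvRuns (l : List Bool) : calculate_streaks_py_alt l = pvRuns l := by
  unfold calculate_streaks_py_alt
  match l with
  | [] => simp [pvRuns]
  | a :: xs =>
      rw [if_neg (by simp)]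
      have hb := pvBounds_bridge (a :: xs) xs.length 1 le_rfl (by simp [Nat.add_comm])
      push_cast at hb
      have h0 : PySem.List.pyGetD (a :: xs) (0 : Int) false = a := by
        norm_num [PySem.List.pyGetD_eq_getElem]
      rw [h0] at hb
      simp only [List.drop_one, List.tail_cons] at hb
      simp only [hb, map_getD_eq_pvDiffs]
      rw [show ((a :: xs).length : Int) = 1 + (xs.length : Int) by simp; ring]
      rw [pvDiffs_bounds xs a 1 0]
      conv_rhs => rw [pvRuns.eq_def]
      simp

-- ===== VERDICT (by name: the statement is the Claim_ definition above) =====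
theorem calculate_streaks_py_spec : Claim_equal_calculate_streaks_py := by
  intro l _
  unfold Spec_calculate_streaks_py
  rw [portA_eq_pvRuns, portB_eq_pvRuns]
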